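-- pv_equiv track=rewrite | github.com/shikgom2/boj | 1027.py | solve
-- ===== SOURCE A (Python) =====
-- def can_see(H, i, j):
--     dx = j - i
--     dy = H[j] - H[i]
--     for k in range(min(i, j) + 1, max(i, j)):
--         val = dx * H[k] - dx * H[i] - dy * (k - i)
--         if val * (1 if i < j else -1) >= 0:
--             return False
--     return True
--
-- def solve(H):
--     N = len(H)
--     result = 0
--     for i in range(N):
--         cnt = 0
--         for j in range(N):
--             if i == j:
--                 continue
--             if can_see(H, i, j):
--                 cnt += 1
--         result = max(cnt, result)
--     return result
-- ===== SOURCE B (Python) =====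
-- def solve(H):
--     # Per building i, one leftward and one rightward sweep tracking the running
--     # maximum slope (compared by cross-multiplication); a building is visible
--     # exactly when its slope strictly exceeds the running maximum.
--     N = len(H)
--     best = 0
--     for i in range(N):
--         cnt = 0
--         bn = bd = None
--         for j in range(i + 1, N):
--             n = H[j] - H[i]
--             d = j - i
--             if bd is None or n * bd > bn * d:
--                 cnt += 1
--                 bn, bd = n, d
--         bn = bd = None
--         for j in range(i - 1, -1, -1):
--             n = H[j] - H[i]
--             d = i - j
--             if bd is None or n * bd > bn * d:
--                 cnt += 1
--                 bn, bd = n, d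
--         best = max(best, cnt)
--     return best
-- ===== Notes on version B (the rewrite author's own statement) =====
-- stated objective: faster
-- what changed: A tests every ordered pair (i,j) by rescanning all buildings between them (O(N^3)); B makes, per building i, one leftward and one rightward sweep keeping a running maximum slope compared by cross-multiplication, counting a building exactly when its slope strictly exceeds the running maximum (O(N^2)).
import Mathlib
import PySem

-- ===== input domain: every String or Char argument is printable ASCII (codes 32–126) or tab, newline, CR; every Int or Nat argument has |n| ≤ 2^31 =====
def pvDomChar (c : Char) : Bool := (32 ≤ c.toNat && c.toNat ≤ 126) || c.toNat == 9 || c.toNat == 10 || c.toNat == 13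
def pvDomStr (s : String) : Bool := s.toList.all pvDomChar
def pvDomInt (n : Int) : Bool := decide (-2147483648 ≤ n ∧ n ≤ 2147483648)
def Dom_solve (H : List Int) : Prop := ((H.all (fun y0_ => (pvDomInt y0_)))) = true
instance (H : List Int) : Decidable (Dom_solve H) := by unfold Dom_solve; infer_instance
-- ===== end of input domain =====

-- B replaces A's O(N^3) all-pairs visibility test by, per building, two sweeps
-- that track the running maximum slope (cross-multiplied): O(N^2) total.

-- ===== PORT A =====
-- indices i, j, k are always in range in every call, so H[x] is pyGetD H x 0 exactly
def canSee (H : List Int) (i j : Int) : Bool :=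
  let dx := j - i
  let dy := PySem.List.pyGetD H j 0 - PySem.List.pyGetD H i 0
  (PySem.List.pyRange (min i j + 1) (max i j) 1).all (fun k =>
    let val := dx * PySem.List.pyGetD H k 0 - dx * PySem.List.pyGetD H i 0 - dy * (k - i)
    !(decide (0 ≤ val * (if i < j then 1 else -1))))

def solve (H : List Int) : Int :=
  (PySem.List.pyRange 0 (H.length : Int) 1).foldl (fun result i =>
    let cnt := (PySem.List.pyRange 0 (H.length : Int) 1).foldl (fun cnt j =>
      if i = j then cnt
      else if canSee H i j then cnt + 1 else cnt) 0
    max cnt result) 0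

-- ===== PORT B =====
-- state: (current max slope as Option (numerator, denominator), count)
def sweepStep (p : Int × Int) (s : Option (Int × Int) × Int) : Option (Int × Int) × Int :=
  match s.1 with
  | none => (some p, s.2 + 1)
  | some b => if b.1 * p.2 < p.1 * b.2 then (some p, s.2 + 1) else s

def solve_alt (H : List Int) : Int :=
  (PySem.List.pyRange 0 (H.length : Int) 1).foldl (fun best i =>
    let s1 := (PySem.List.pyRange (i + 1) (H.length : Int) 1).foldl
      (fun s j => sweepStep (PySem.List.pyGetD H j 0 - PySem.List.pyGetD H i 0, j - i) s)
      (none, 0)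
    let s2 := (PySem.List.pyRange (i - 1) (-1) (-1)).foldl
      (fun s j => sweepStep (PySem.List.pyGetD H j 0 - PySem.List.pyGetD H i 0, i - j) s)
      (none, s1.2)
    max best s2.2) 0

-- ===== PRECONDITION & SPEC =====
def Spec_solve (H : List Int) (out : Int) : Prop := out = solve_alt H
instance (H : List Int) (out : Int) : Decidable (Spec_solve H out) := by unfold Spec_solve; infer_instance

-- ===== CLAIM (what is proved, stated in full; the proofs are below) =====
def Claim_equal_solve : Prop := ∀ (H : List Int), Dom_solve H → Spec_solve H (solve H)

-- ===== LEMMAS AND PROOFS =====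

-- sweep state invariant: the stored pair is the slope of some processed j and no
-- processed slope is strictly greater (denominators positive, cross-multiplied)
def stOk (f : Int → Int × Int) (pre : List Int) (b : Option (Int × Int)) : Prop :=
  (b = none ∧ pre = []) ∨
  ∃ m, m ∈ pre ∧ b = some (f m) ∧ ∀ k ∈ pre, ¬ (f m).1 * (f k).2 < (f k).1 * (f m).2

-- number of j in l whose slope strictly exceeds every slope of the elements before it
def visCnt (f : Int → Int × Int) : List Int → List Int → Int
  | _, [] => 0
  | pre, j :: l =>
    (if ∀ k ∈ pre, (f k).1 * (f j).2 < (f j).1 * (f k).2 then 1 else 0) + visCnt f (pre ++ [j]) l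

lemma visCnt_congr (f : Int → Int × Int) :
    ∀ (l pre1 pre2 : List Int), (∀ k, k ∈ pre1 ↔ k ∈ pre2) →
      visCnt f pre1 l = visCnt f pre2 l := by
  intro l
  induction l with
  | nil => intro _ _ _; rfl
  | cons j t ih =>
    intro pre1 pre2 h
    simp only [visCnt]
    rw [ih (pre1 ++ [j]) (pre2 ++ [j]) (by intro k; simp [h k])]
    congr 1
    have hiff : (∀ k ∈ pre1, (f k).1 * (f j).2 < (f j).1 * (f k).2) ↔
        (∀ k ∈ pre2, (f k).1 * (f j).2 < (f j).1 * (f k).2) := by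
      constructor
      · intro hh k hk; exact hh k ((h k).mpr hk)
      · intro hh k hk; exact hh k ((h k).mp hk)
    exact if_congr hiff rfl rfl

lemma step_count (f : Int → Int × Int) (pre : List Int) (b : Option (Int × Int)) (c j : Int)
    (hpos : ∀ k, k ∈ j :: pre → 0 < (f k).2) (hok : stOk f pre b) :
    (sweepStep (f j) (b, c)).2 =
      c + (if ∀ k ∈ pre, (f k).1 * (f j).2 < (f j).1 * (f k).2 then 1 else 0) := by
  rcases hok with ⟨hb, hpre⟩ | ⟨m, hm, hb, hmax⟩
  · subst hb; subst hpre; simp [sweepStep]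
  · subst hb
    by_cases hcond : (f m).1 * (f j).2 < (f j).1 * (f m).2
    · have hall : ∀ k ∈ pre, (f k).1 * (f j).2 < (f j).1 * (f k).2 := by
        intro k hk
        have h1 : (f k).1 * (f m).2 ≤ (f m).1 * (f k).2 := not_lt.mp (hmax k hk)
        have hj2 : 0 < (f j).2 := hpos j (by simp)
        have hm2 : 0 < (f m).2 := hpos m (by simp [hm])
        have hk2 : 0 < (f k).2 := hpos k (by simp [hk])
        nlinarith [mul_le_mul_of_nonneg_right h1 (le_of_lt hj2),
          mul_lt_mul_of_pos_right hcond hk2]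
      simp [sweepStep, hcond]
      exact hall
    · have hnall : ¬ ∀ k ∈ pre, (f k).1 * (f j).2 < (f j).1 * (f k).2 := by
        intro hh; exact hcond (hh m hm)
      simp [sweepStep, hcond, hnall]

lemma step_state (f : Int → Int × Int) (pre : List Int) (b : Option (Int × Int)) (c j : Int)
    (hpos : ∀ k, k ∈ j :: pre → 0 < (f k).2) (hok : stOk f pre b) :
    stOk f (pre ++ [j]) (sweepStep (f j) (b, c)).1 := by
  rcases hok with ⟨hb, hpre⟩ | ⟨m, hm, hb, hmax⟩
  · subst hb; subst hpre
    refine Or.inr ⟨j, by simp, rfl, ?_⟩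
    intro k hk
    simp at hk; subst hk
    exact lt_irrefl _
  · subst hb
    by_cases hcond : (f m).1 * (f j).2 < (f j).1 * (f m).2
    · refine Or.inr ⟨j, by simp, by simp [sweepStep, hcond], ?_⟩
      intro k hk
      rcases List.mem_append.mp hk with hk | hk
      · have h1 : (f k).1 * (f m).2 ≤ (f m).1 * (f k).2 := not_lt.mp (hmax k hk)
        have hj2 : 0 < (f j).2 := hpos j (by simp)
        have hm2 : 0 < (f m).2 := hpos m (by simp [hm])
        have hk2 : 0 < (f k).2 := hpos k (by simp [hk])
        intro hbad
        nlinarith [mul_le_mul_of_nonneg_right h1 (le_of_lt hj2),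
          mul_lt_mul_of_pos_right hcond hk2, mul_lt_mul_of_pos_right hbad hm2]
      · simp at hk; subst hk; exact lt_irrefl _
    · refine Or.inr ⟨m, List.mem_append_left _ hm, by simp [sweepStep, hcond], ?_⟩
      intro k hk
      rcases List.mem_append.mp hk with hk | hk
      · exact hmax k hk
      · simp at hk; subst hk; exact hcond

lemma sweep_foldl (f : Int → Int × Int) :
    ∀ (l pre : List Int) (b : Option (Int × Int)) (c : Int),
      (∀ k, k ∈ pre ++ l → 0 < (f k).2) → stOk f pre b →
      (l.foldl (fun s j => sweepStep (f j) s) (b, c)).2 = c + visCnt f pre l := by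
  intro l
  induction l with
  | nil => intro pre b c _ _; simp [visCnt]
  | cons j t ih =>
    intro pre b c hpos hok
    have hpos' : ∀ k, k ∈ j :: pre → 0 < (f k).2 := by
      intro k hk; apply hpos; rcases List.mem_cons.mp hk with h | h <;> simp [h]
    have hcnt := step_count f pre b c j hpos' hok
    have hst := step_state f pre b c j hpos' hok
    simp only [List.foldl_cons]
    have heq : sweepStep (f j) (b, c) = ((sweepStep (f j) (b, c)).1, (sweepStep (f j) (b, c)).2) := rfl
    rw [heq, ih (pre ++ [j]) _ _ (by intro k hk; apply hpos; simp at hk ⊢; tauto) hst, hcnt]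
    simp only [visCnt]
    ring

-- rightward sweep: prefix {i+1,…,a-1}, remaining range [a, Nv); visibility matches can_see
lemma right_cnt (H : List Int) (i Nv : Int) :
    ∀ (n : Nat) (a : Int), i < a → (Nv - a).toNat = n →
      visCnt (fun j => (PySem.List.pyGetD H j 0 - PySem.List.pyGetD H i 0, j - i))
        (PySem.List.pyRange (i + 1) a 1) (PySem.List.pyRange a Nv 1)
      = (((PySem.List.pyRange a Nv 1).countP (fun j => canSee H i j)) : Int) := by
  intro n
  induction n with
  | zero =>
    intro a _ h0
    have : Nv ≤ a := by omega
    simp [PySem.List.pyRange_one_eq_nil this, visCnt]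
  | succ n ih =>
    intro a hia hn
    have haN : a < Nv := by omega
    rw [PySem.List.pyRange_one_cons haN]
    simp only [visCnt, List.countP_cons]
    rw [← PySem.List.pyRange_one_succ_right (by omega : i + 1 ≤ a)]
    rw [ih (a + 1) (by omega) (by omega)]
    have hsee : (∀ k ∈ PySem.List.pyRange (i + 1) a 1,
        (PySem.List.pyGetD H k 0 - PySem.List.pyGetD H i 0) * (a - i) <
        (PySem.List.pyGetD H a 0 - PySem.List.pyGetD H i 0) * (k - i)) ↔ canSee H i a = true := by
      simp only [canSee, min_eq_left (le_of_lt hia), max_eq_right (le_of_lt hia), if_pos hia,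
        List.all_eq_true, Bool.not_eq_eq_eq_not, Bool.not_true, decide_eq_false_iff_not, not_le]
      constructor
      · intro hh k hk; have := hh k hk; nlinarith
      · intro hh k hk; have := hh k hk; nlinarith
    by_cases hc : canSee H i a = true
    · rw [if_pos (hsee.mpr hc)]; simp [hc]; ring
    · rw [if_neg (fun hh => hc (hsee.mp hh))]
      simp [eq_false_of_ne_true hc]

-- leftward sweep
lemma left_cnt (H : List Int) (i : Int) :
    ∀ (n : Nat) (a : Int), a < i → (a + 1).toNat = n →
      visCnt (fun j => (PySem.List.pyGetD H j 0 - PySem.List.pyGetD H i 0, i - j))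
        (PySem.List.pyRange (a + 1) i 1) (PySem.List.pyRange a (-1) (-1))
      = (((PySem.List.pyRange a (-1) (-1)).countP (fun j => canSee H i j)) : Int) := by
  intro n
  induction n with
  | zero =>
    intro a _ h0
    have : a ≤ -1 := by omega
    simp [PySem.List.pyRange_neg_one_eq_nil this, visCnt]
  | succ n ih =>
    intro a hai hn
    have ha0 : (-1 : Int) < a := by omega
    rw [PySem.List.pyRange_neg_one_cons ha0]
    simp only [visCnt, List.countP_cons]
    have hcg := visCnt_congr (fun j => (PySem.List.pyGetD H j 0 - PySem.List.pyGetD H i 0, i - j))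
      (PySem.List.pyRange (a - 1) (-1) (-1))
      (PySem.List.pyRange (a + 1) i 1 ++ [a]) (PySem.List.pyRange (a - 1 + 1) i 1)
      (by intro k; simp [PySem.List.mem_pyRange_one]; omega)
    rw [hcg]
    rw [ih (a - 1) (by omega) (by omega)]
    have hsee : (∀ k ∈ PySem.List.pyRange (a + 1) i 1,
        (PySem.List.pyGetD H k 0 - PySem.List.pyGetD H i 0) * (i - a) <
        (PySem.List.pyGetD H a 0 - PySem.List.pyGetD H i 0) * (i - k)) ↔ canSee H i a = true := by
      simp only [canSee, min_eq_right (le_of_lt hai), max_eq_left (le_of_lt hai),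
        if_neg (by omega : ¬ i < a),
        List.all_eq_true, Bool.not_eq_eq_eq_not, Bool.not_true, decide_eq_false_iff_not, not_le]
      constructor
      · intro hh k hk; have := hh k hk; nlinarith
      · intro hh k hk; have := hh k hk; nlinarith
    by_cases hc : canSee H i a = true
    · rw [if_pos (hsee.mpr hc)]; simp [hc]; ring
    · rw [if_neg (fun hh => hc (hsee.mp hh))]
      simp [eq_false_of_ne_true hc]

-- ===== VERDICT (by name: the statement is the Claim_ definition above) =====
-- the inner count of A equals the sum of B's two sweep counts, for each 0 ≤ i < len H
lemma cnt_eq (H : List Int) (i : Int) (hi0 : 0 ≤ i) (hiN : i < (H.length : Int)) :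
    ((PySem.List.pyRange 0 (H.length : Int) 1).foldl (fun cnt j =>
      if i = j then cnt
      else if canSee H i j then cnt + 1 else cnt) 0)
    = ((PySem.List.pyRange (i - 1) (-1) (-1)).foldl
        (fun s j => sweepStep (PySem.List.pyGetD H j 0 - PySem.List.pyGetD H i 0, i - j) s)
        (none, ((PySem.List.pyRange (i + 1) (H.length : Int) 1).foldl
          (fun s j => sweepStep (PySem.List.pyGetD H j 0 - PySem.List.pyGetD H i 0, j - i) s)
          (none, 0)).2)).2 := by
  -- A's side: count of visible j left of i plus count right of i
  rw [PySem.List.foldl_congr_mem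
    (l := PySem.List.pyRange 0 (H.length : Int) 1) (init := 0)
    (f := fun cnt j => if i = j then cnt else if canSee H i j then cnt + 1 else cnt)
    (g := fun cnt j => if i ≠ j ∧ canSee H i j = true then cnt + 1 else cnt)
    (by
      intro acc x _
      by_cases hx : i = x
      · simp [hx]
      · by_cases hcs : canSee H i x = true <;> simp [hx, hcs])]
  rw [PySem.List.foldl_ite_add_one]
  rw [PySem.List.pyRange_one_append 0 i (H.length : Int) hi0 (le_of_lt hiN),
    PySem.List.pyRange_one_cons hiN, List.countP_append, List.countP_cons]
  -- B's side
  have hR := sweep_foldl (fun j => (PySem.List.pyGetD H j 0 - PySem.List.pyGetD H i 0, j - i))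
    (PySem.List.pyRange (i + 1) (H.length : Int) 1) [] none 0
    (by intro k hk; simp [PySem.List.mem_pyRange_one] at hk; simp; omega)
    (Or.inl ⟨rfl, rfl⟩)
  have hL := sweep_foldl (fun j => (PySem.List.pyGetD H j 0 - PySem.List.pyGetD H i 0, i - j))
    (PySem.List.pyRange (i - 1) (-1) (-1)) [] none
    (((PySem.List.pyRange (i + 1) (H.length : Int) 1).foldl
      (fun s j => sweepStep (PySem.List.pyGetD H j 0 - PySem.List.pyGetD H i 0, j - i) s)
      (none, 0)).2)
    (by intro k hk; simp [PySem.List.mem_pyRange_neg_one] at hk; simp; omega)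
    (Or.inl ⟨rfl, rfl⟩)
  rw [hL, hR]
  -- rewrite the two visCnt's via right_cnt / left_cnt
  have hRc := right_cnt H i (H.length : Int) ((H.length : Int) - (i + 1)).toNat (i + 1)
    (by omega) rfl
  rw [PySem.List.pyRange_one_eq_nil (le_refl (i + 1))] at hRc
  have hLc := left_cnt H i (i - 1 + 1).toNat (i - 1) (by omega) rfl
  rw [(by ring : i - 1 + 1 = i), PySem.List.pyRange_one_eq_nil (le_refl i)] at hLc
  rw [hRc, hLc]
  -- the countP over the descending list is the countP over [0, i)
  have hrev : PySem.List.pyRange (i - 1) (-1) (-1) = (PySem.List.pyRange 0 i 1).reverse := by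
    rw [PySem.List.pyRange_neg_one_eq_reverse]
    norm_num
  rw [hrev, List.countP_reverse]
  -- align predicates and finish
  have h1 : (PySem.List.pyRange 0 i 1).countP (fun j => decide (i ≠ j ∧ canSee H i j = true))
      = (PySem.List.pyRange 0 i 1).countP (fun j => canSee H i j) := by
    apply List.countP_congr
    intro j hj
    simp [PySem.List.mem_pyRange_one] at hj
    simp [show i ≠ j by omega]
  have h2 : (PySem.List.pyRange (i + 1) (H.length : Int) 1).countP
        (fun j => decide (i ≠ j ∧ canSee H i j = true))
      = (PySem.List.pyRange (i + 1) (H.length : Int) 1).countP (fun j => canSee H i j) := by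
    apply List.countP_congr
    intro j hj
    simp [PySem.List.mem_pyRange_one] at hj
    simp [show i ≠ j by omega]
  rw [h1, h2]
  simp
  ring

-- ===== the verdict proof =====
theorem solve_spec : Claim_equal_solve := by
  intro H _
  show solve H = solve_alt H
  unfold solve solve_alt
  apply PySem.List.foldl_congr_mem
  intro acc i hi
  rw [PySem.List.mem_pyRange_one] at hi
  simp only []
  rw [cnt_eq H i hi.1 hi.2]
  exact max_comm _ _
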